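-- pv_equiv track=rewrite | github.com/adamShiau/adamShiau_Python | Aegiverse_API/FixIMU_GUI_TADTE_20230721(GP-22-FA)/myLib/crcCalculator/crcLib.py | crc_8
-- ===== SOURCE A (Python) =====
-- def crc_8(message, nBytes):
--     """
--     Description
--     -----------
--     Calculate 8-bit CRC of input message.
--     ref: https://barrgroup.com/embedded-systems/how-to/crc-calculation-c-code
--     Parameters
--     ----------
--     message: byte list, to be used to calculate the CRC.
--     nBytes: int, total bytes number of input message.
--     Returns
--     -------
--     remainder: One byte CRC value.
--     """
--     WIDTH = 8
--     TOPBIT = (1 << (WIDTH - 1))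
--     POLYNOMIAL = 0x07
--     remainder = 0
--     for byte in range(0, nBytes):
--         remainder = remainder ^ (message[byte] << (WIDTH - 8))
--
--         for bit in range(8, 0, -1):
--             if remainder & TOPBIT:
--                 remainder = ((remainder << 1) & 0xFF) ^ POLYNOMIAL
--             else:
--                 remainder = (remainder << 1)
--     return remainder
-- ===== SOURCE B (Python) =====
-- # CRC-8 (poly 0x07) via a 256-entry table built once at import time:
-- # each message byte becomes one table lookup instead of an 8-iteration bit loop.
-- _CRC8_TABLE = []
-- for _i in range(256):
--     _r = _i
--     for _ in range(8):
--         _r = ((_r << 1) & 0xFF) ^ 0x07 if _r & 0x80 else _r << 1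
--     _CRC8_TABLE.append(_r)
--
--
-- def crc_8(message, nBytes):
--     remainder = 0
--     for byte in range(nBytes):
--         remainder = _CRC8_TABLE[remainder ^ message[byte]]
--     return remainder
-- ===== Notes on version B (the rewrite author's own statement) =====
-- stated objective: alternative
-- what changed: Replaces the inner 8-iteration bit loop run for every byte by a 256-entry CRC table precomputed once at module load, so processing each byte is a single table lookup; Pre_ excludes out-of-range reads (IndexError in both) and message prefix entries outside 0..255, on which A returns a multi-byte value that is no 8-bit CRC while B's table lookup raises IndexError or wraps (for negative entries the wrap agrees with A on some inputs and not on others).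
-- outside the precondition, e.g. on crc_8([300], 1): A returns 196, B raises IndexError; on crc_8([-256], 1): A returns -65536, B returns 0; on crc_8([-141, -162], 2): A returns -65536, B returns 0
import Mathlib
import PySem

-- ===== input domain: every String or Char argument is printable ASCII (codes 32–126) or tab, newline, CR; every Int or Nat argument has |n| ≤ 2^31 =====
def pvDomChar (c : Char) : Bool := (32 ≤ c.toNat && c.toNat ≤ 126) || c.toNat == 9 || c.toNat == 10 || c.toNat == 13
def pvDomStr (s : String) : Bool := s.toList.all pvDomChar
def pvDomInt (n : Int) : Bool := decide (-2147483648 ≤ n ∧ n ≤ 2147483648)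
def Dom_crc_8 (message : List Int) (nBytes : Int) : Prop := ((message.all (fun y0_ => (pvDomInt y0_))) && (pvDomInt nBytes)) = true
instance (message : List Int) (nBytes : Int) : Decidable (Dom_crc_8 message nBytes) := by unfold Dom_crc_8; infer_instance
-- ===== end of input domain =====

-- B replaces A's per-byte 8-iteration bit loop by a 256-entry CRC table built once; each byte is then one table lookup.

-- ===== PORT A =====
def crc_8 (message : List Int) (nBytes : Int) : Int :=
  let WIDTH : Nat := 8
  let TOPBIT : Int := 1 <<< (WIDTH - 1)
  let POLYNOMIAL : Int := 0x07
  (PySem.List.pyRange 0 nBytes 1).foldl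
    (fun remainder byte =>
      let remainder := PySem.Int.bxor remainder ((PySem.List.pyGetD message byte 0) <<< (WIDTH - 8))
      (PySem.List.pyRange 8 0 (-1)).foldl
        (fun remainder _bit =>
          if PySem.Int.band remainder TOPBIT ≠ 0 then
            PySem.Int.bxor (PySem.Int.band (remainder <<< (1:Nat)) 0xFF) POLYNOMIAL
          else
            remainder <<< (1:Nat))
        remainder)
    0

-- ===== PORT B =====
-- the module-level table _CRC8_TABLE of Source B (each entry: the 8-iteration bit loop run on its index)
def crc8Table : List Int :=
  (List.range 256).map (fun i =>
    (List.range 8).foldl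
      (fun r _ =>
        if PySem.Int.band r 0x80 ≠ 0 then PySem.Int.bxor (PySem.Int.band (r <<< (1:Nat)) 0xFF) 0x07
        else r <<< (1:Nat))
      (Int.ofNat i))

def crc_8_alt (message : List Int) (nBytes : Int) : Int :=
  (PySem.List.pyRange 0 nBytes 1).foldl
    (fun remainder byte =>
      PySem.List.pyGetD crc8Table (PySem.Int.bxor remainder (PySem.List.pyGetD message byte 0)) 0)
    0

-- ===== PRECONDITION & SPEC =====
-- Pre_ excludes reads past the end of message (IndexError in both programs) and looked-at entries outside
-- 0..255: message is documented as a byte list, and on non-byte entries A returns a multi-byte value that is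
-- no 8-bit CRC while B's 256-entry table lookup raises IndexError or wraps (for negative entries the wrap
-- agrees with A on some inputs and not on others, so every non-byte entry is excluded).
def Pre_crc_8 (message : List Int) (nBytes : Int) : Prop :=
  nBytes ≤ (message.length : Int) ∧ ∀ b ∈ message.take nBytes.toNat, 0 ≤ b ∧ b < 256
instance (message : List Int) (nBytes : Int) : Decidable (Pre_crc_8 message nBytes) := by
  unfold Pre_crc_8; infer_instance

def pvWitness_crc_8 : List Int × Int := ([18, 52], 2)

def Spec_crc_8 (message : List Int) (nBytes : Int) (out : Int) : Prop := out = crc_8_alt message nBytes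
instance (message : List Int) (nBytes : Int) (out : Int) : Decidable (Spec_crc_8 message nBytes out) := by
  unfold Spec_crc_8; infer_instance

-- ===== CLAIM (what is proved, stated in full; the proofs are below) =====
def Claim_equal_crc_8 : Prop := ∀ (message : List Int) (nBytes : Int), Dom_crc_8 message nBytes → Pre_crc_8 message nBytes → Spec_crc_8 message nBytes (crc_8 message nBytes)

-- ===== LEMMAS AND PROOFS =====

-- Nat-side model of one iteration of the bit loop
def natBit (m : Nat) : Nat :=
  if m &&& 128 ≠ 0 then ((m <<< 1) &&& 255) ^^^ 7 else m <<< 1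

lemma and128_lt : ∀ m : Fin 256, m.val &&& 128 = 0 → m.val < 128 := by
  set_option maxRecDepth 4096 in decide

lemma natBit_lt (m : Nat) (hm : m < 256) : natBit m < 256 := by
  unfold natBit
  split_ifs with h
  · have h1 : (m <<< 1) &&& 255 < 256 := Nat.lt_succ_of_le Nat.and_le_right
    exact Nat.xor_lt_two_pow (n := 8) h1 (by norm_num)
  · have h2 : m < 128 := and128_lt ⟨m, hm⟩ (by simpa using h)
    simp only [Nat.shiftLeft_eq]
    omega

lemma intBit_eq (m : Nat) :
    (if PySem.Int.band (↑m) 128 ≠ 0 then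
       PySem.Int.bxor (PySem.Int.band (((↑m : Int)) <<< (1:Nat)) 255) 7
     else (↑m : Int) <<< (1:Nat)) = ↑(natBit m) := by
  have hband : PySem.Int.band (↑m) 128 = ((m &&& 128 : Nat) : Int) := by
    exact_mod_cast PySem.Int.band_natCast m 128
  have hshift : ((m:Int) <<< (1:Nat)) = ((m <<< 1 : Nat):Int) := by
    rw [Int.shiftLeft_eq, Nat.shiftLeft_eq]; push_cast; ring
  have hband2 : PySem.Int.band ((m <<< 1 : Nat):Int) 255 = (((m <<< 1) &&& 255 : Nat) : Int) := by
    exact_mod_cast PySem.Int.band_natCast (m <<< 1) 255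
  have hx : PySem.Int.bxor (((m <<< 1) &&& 255 : Nat):Int) 7 = ((((m <<< 1) &&& 255) ^^^ 7 : Nat) : Int) := by
    exact_mod_cast PySem.Int.bxor_natCast ((m <<< 1) &&& 255) 7
  rw [hband, hshift, hband2, hx, natBit]
  by_cases h : m &&& 128 = 0 <;> simp [h]

lemma foldl_ignore {α : Type} (f : Int → Int) :
    ∀ (L : List α) (r : Int), L.foldl (fun a _ => f a) r = f^[L.length] r := by
  intro L
  induction L with
  | nil => intro r; simp
  | cons x L ih => intro r; simp [ih, Function.iterate_succ_apply]

lemma iterate_bits (k : Nat) :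
    ∀ m : Nat, m < 256 →
      (fun r : Int =>
        if PySem.Int.band r 128 ≠ 0 then PySem.Int.bxor (PySem.Int.band (r <<< (1:Nat)) 255) 7
        else r <<< (1:Nat))^[k] ↑m = ↑(natBit^[k] m) ∧ natBit^[k] m < 256 := by
  induction k with
  | zero => intro m hm; simpa using hm
  | succ k ih =>
    intro m hm
    simp only [Function.iterate_succ_apply]
    rw [intBit_eq m]
    exact ih (natBit m) (natBit_lt m hm)

lemma table_lookup (n : Nat) (hn : n < 256) :
    PySem.List.pyGetD crc8Table (↑n) 0 = ↑(natBit^[8] n) := by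
  rw [PySem.List.pyGetD_natCast]
  unfold crc8Table
  rw [List.getD_eq_getElem _ _ (by simpa using hn)]
  simp only [List.getElem_map, List.getElem_range]
  rw [foldl_ignore]
  simpa using (iterate_bits 8 n hn).1

set_option maxHeartbeats 1000000 in
lemma main_fold (message : List Int) :
    ∀ (L : List Int) (r : Nat), r < 256 →
      (∀ i ∈ L, ∃ b : Nat, PySem.List.pyGetD message i 0 = ↑b ∧ b < 256) →
      L.foldl (fun remainder byte =>
        (PySem.List.pyRange 8 0 (-1)).foldl
          (fun r _ => if PySem.Int.band r 128 ≠ 0 then PySem.Int.bxor (PySem.Int.band (r <<< (1:Nat)) 255) 7 else r <<< (1:Nat))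
          (PySem.Int.bxor remainder ((PySem.List.pyGetD message byte 0) <<< (0:Nat)))) (↑r)
      = L.foldl (fun remainder byte =>
          PySem.List.pyGetD crc8Table (PySem.Int.bxor remainder (PySem.List.pyGetD message byte 0)) 0) (↑r) := by
  intro L
  induction L with
  | nil => intro r _ _; rfl
  | cons i L ih =>
    intro r hr hmem
    obtain ⟨b, hb, hb256⟩ := hmem i (List.mem_cons_self ..)
    have hxor : PySem.Int.bxor (↑r) (↑b : Int) = ↑(r ^^^ b) := by
      exact_mod_cast PySem.Int.bxor_natCast r b
    have hxlt : r ^^^ b < 256 := Nat.xor_lt_two_pow (n := 8) hr hb256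
    have hlen : (PySem.List.pyRange 8 0 (-1)).length = 8 := by decide
    simp only [List.foldl_cons]
    rw [hb, Int.shiftLeft_zero, hxor]
    rw [foldl_ignore]
    rw [hlen]
    rw [(iterate_bits 8 (r ^^^ b) hxlt).1]
    rw [table_lookup _ hxlt]
    exact ih _ (iterate_bits 8 (r ^^^ b) hxlt).2 (fun j hj => hmem j (List.mem_cons_of_mem _ hj))

-- ===== VERDICT (by name: the statement is the Claim_ definition above) =====
theorem crc_8_spec : Claim_equal_crc_8 := by
  intro message nBytes _dom hpre
  obtain ⟨hlen, hbytes⟩ := hpre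
  unfold Spec_crc_8
  show (PySem.List.pyRange 0 nBytes 1).foldl
      (fun remainder byte =>
        (PySem.List.pyRange 8 0 (-1)).foldl
          (fun r _ => if PySem.Int.band r 128 ≠ 0 then PySem.Int.bxor (PySem.Int.band (r <<< (1:Nat)) 255) 7 else r <<< (1:Nat))
          (PySem.Int.bxor remainder ((PySem.List.pyGetD message byte 0) <<< (0:Nat)))) (↑(0:Nat))
    = (PySem.List.pyRange 0 nBytes 1).foldl
        (fun remainder byte =>
          PySem.List.pyGetD crc8Table (PySem.Int.bxor remainder (PySem.List.pyGetD message byte 0)) 0) (↑(0:Nat))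
  apply main_fold message _ 0 (by norm_num)
  intro i hi
  have hmem := (PySem.List.mem_pyRange_one).mp hi
  have hi0 : 0 ≤ i := hmem.1
  have hilen : i < (message.length : Int) := lt_of_lt_of_le hmem.2 hlen
  have hget : PySem.List.pyGetD message i 0 = message[i.toNat] :=
    PySem.List.pyGetD_eq_getElem _ _ hi0 hilen
  have htn : i.toNat < nBytes.toNat := by omega
  have htlen : i.toNat < (message.take nBytes.toNat).length := by
    simp [List.length_take]; omega
  have helem : message[i.toNat] ∈ message.take nBytes.toNat := by
    have : (message.take nBytes.toNat)[i.toNat] = message[i.toNat] := List.getElem_take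
    rw [← this]; exact List.getElem_mem _
  obtain ⟨hb0, hb256⟩ := hbytes _ helem
  refine ⟨(message[i.toNat]).toNat, ?_, ?_⟩
  · rw [hget]; omega
  · omega
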